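-- pv_equiv track=rewrite | github.com/poker-x-studio/python_test_proj | test_swap.py | swap_dict
-- ===== SOURCE A (Python) =====
-- def swap_dict(dict_a, index_0, index_1)->tuple:
--
--     #判断参数
--     if not isinstance(dict_a, dict):
--         return (False,None)
--     if not isinstance(index_0, int) or index_0<0 or index_0>=len(dict_a):
--         return (False,None)
--     if not isinstance(index_1, int) or index_1<0 or index_1>=len(dict_a):
--         return (False,None)
--
--     #保存元素的值
--     index = 0 #索引
--     for key in dict_a:
--         if index==index_0:
--             source_element = dict_a[key]
--         if index==index_1:
--             target_element = dict_a[key]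
--         index+=1
--
--     index = 0 #索引
--     for key in dict_a:
--         if index==index_0:
--             dict_a[key] = target_element
--         if index==index_1:
--             dict_a[key] = source_element
--         index+=1
--
--     return (True, dict_a)
-- ===== SOURCE B (Python) =====
-- def swap_dict(dict_a, index_0, index_1)->tuple:
--     # same validation as the original
--     if not isinstance(dict_a, dict):
--         return (False, None)
--     if not isinstance(index_0, int) or index_0 < 0 or index_0 >= len(dict_a):
--         return (False, None)
--     if not isinstance(index_1, int) or index_1 < 0 or index_1 >= len(dict_a):
--         return (False, None)
--     # build the positional key index once, then swap by direct indexing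
--     keys = list(dict_a)
--     dict_a[keys[index_0]], dict_a[keys[index_1]] = dict_a[keys[index_1]], dict_a[keys[index_0]]
--     return (True, dict_a)
-- ===== Notes on version B (the rewrite author's own statement) =====
-- stated objective: simpler
-- what changed: replaces the two counter-guarded full scans over the dict with a one-time key-list build and a direct positional tuple swap
import Mathlib
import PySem

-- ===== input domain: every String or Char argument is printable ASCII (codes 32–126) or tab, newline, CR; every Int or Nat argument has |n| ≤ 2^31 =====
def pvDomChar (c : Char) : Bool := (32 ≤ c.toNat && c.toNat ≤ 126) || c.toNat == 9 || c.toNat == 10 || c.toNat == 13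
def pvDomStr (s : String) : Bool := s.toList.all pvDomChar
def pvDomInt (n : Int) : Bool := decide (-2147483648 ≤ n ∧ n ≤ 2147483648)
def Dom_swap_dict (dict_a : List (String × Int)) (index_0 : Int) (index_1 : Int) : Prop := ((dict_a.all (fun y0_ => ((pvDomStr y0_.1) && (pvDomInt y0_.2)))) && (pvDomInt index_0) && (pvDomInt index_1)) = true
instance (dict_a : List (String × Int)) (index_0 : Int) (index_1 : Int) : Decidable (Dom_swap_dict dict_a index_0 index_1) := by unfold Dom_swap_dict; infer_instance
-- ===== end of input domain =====

-- B replaces A's two counter-guarded scans with a one-time key list and a direct positional swap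
-- (simpler; both the Python A and the Python B mutate dict_a in place — the equivalence proved is about the return value).


-- ===== PORT A =====
-- literal transliteration of A: validation, then two counter-guarded scans over the keys
-- (dict_a[key] for a key of the dict is PySem.Dict.getD — the key is always present, so no KeyError arises)
def swap_dict (dict_a : List (String × Int)) (index_0 : Int) (index_1 : Int) : Bool × (Option (List (String × Int))) :=
  let d := PySem.Dict.mk dict_a
  if index_0 < 0 ∨ (d.size : Int) ≤ index_0 then (false, none)
  else if index_1 < 0 ∨ (d.size : Int) ≤ index_1 then (false, none)
  else
    -- first loop: save source_element / target_element
    let st := d.keys.foldl (fun (st : Int × Option Int × Option Int) k =>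
        (st.1 + 1,
         (if st.1 = index_0 then some (d.getD k 0) else st.2.1),
         (if st.1 = index_1 then some (d.getD k 0) else st.2.2))) (0, none, none)
    let source_element := st.2.1.getD 0
    let target_element := st.2.2.getD 0
    -- second loop: write them back (iterates the unchanged key sequence, as Python does)
    let r := d.keys.foldl (fun (st : Int × PySem.Dict String Int) k =>
        (st.1 + 1,
         let d1 := if st.1 = index_0 then st.2.insert k target_element else st.2
         if st.1 = index_1 then d1.insert k source_element else d1)) (0, d)
    (true, some r.2.items)

-- ===== PORT B =====
-- literal transliteration of B: same validation, then keys list + direct positional swap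
def swap_dict_alt (dict_a : List (String × Int)) (index_0 : Int) (index_1 : Int) : Bool × (Option (List (String × Int))) :=
  let d := PySem.Dict.mk dict_a
  if index_0 < 0 ∨ (d.size : Int) ≤ index_0 then (false, none)
  else if index_1 < 0 ∨ (d.size : Int) ≤ index_1 then (false, none)
  else
    let keys := d.keys
    let k0 := (PySem.List.pyGet? keys index_0).getD ""   -- keys[index_0]; index validated, so some
    let k1 := (PySem.List.pyGet? keys index_1).getD ""   -- keys[index_1]
    let v0 := d.getD k0 0                                -- dict_a[keys[index_0]]
    let v1 := d.getD k1 0                                -- dict_a[keys[index_1]]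
    let d' := (d.insert k0 v1).insert k1 v0              -- the simultaneous assignment, left to right
    (true, some d'.items)

-- ===== PRECONDITION & SPEC =====
def Spec_swap_dict (dict_a : List (String × Int)) (index_0 : Int) (index_1 : Int) (out : Bool × (Option (List (String × Int)))) : Prop := out = swap_dict_alt dict_a index_0 index_1
instance (dict_a : List (String × Int)) (index_0 : Int) (index_1 : Int) (out : Bool × (Option (List (String × Int)))) : Decidable (Spec_swap_dict dict_a index_0 index_1 out) := by unfold Spec_swap_dict; infer_instance

-- ===== CLAIM (what is proved, stated in full; the proofs are below) =====
def Claim_equal_swap_dict : Prop := ∀ (dict_a : List (String × Int)) (index_0 : Int) (index_1 : Int), Dom_swap_dict dict_a index_0 index_1 → Spec_swap_dict dict_a index_0 index_1 (swap_dict dict_a index_0 index_1)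

-- ===== LEMMAS AND PROOFS =====

-- A's first loop, in closed form: the counter ends at c + len, and each Option slot holds the
-- f-image of the key at the matching position (if the position was hit), else its start value.
theorem pvFold1 (a b : Int) (f : String → Int) :
    ∀ (ks : List String) (c : Int) (s t : Option Int),
      ks.foldl (fun (st : Int × Option Int × Option Int) k =>
          (st.1 + 1,
           (if st.1 = a then some (f k) else st.2.1),
           (if st.1 = b then some (f k) else st.2.2))) (c, s, t)
      = (c + ks.length,
         (if 0 ≤ a - c ∧ a - c < ks.length then some (f (ks.getD (a - c).toNat "")) else s),
         (if 0 ≤ b - c ∧ b - c < ks.length then some (f (ks.getD (b - c).toNat "")) else t)) := by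
  intro ks
  induction ks with
  | nil => intro c s t; simp
  | cons k ks ih =>
    intro c s t
    have hsh : ∀ x : Int, (k :: ks).getD (x - c).toNat "" =
        if x ≤ c then k else ks.getD (x - (c + 1)).toNat "" := by
      intro x
      by_cases hx : x ≤ c
      · rw [if_pos hx]
        have e : (x - c).toNat = 0 := by omega
        rw [e]; rfl
      · rw [if_neg hx]
        have e : (x - c).toNat = (x - (c + 1)).toNat + 1 := by omega
        rw [e]; rfl
    simp only [List.foldl_cons, ih, List.length_cons, Prod.mk.injEq]
    refine ⟨by push_cast; ring, ?_, ?_⟩ <;>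
      rw [hsh] <;> split_ifs <;> first | rfl | omega

-- A's second loop, in closed form: it performs the (at most two) inserts, in iteration order.
theorem pvFold2 (a b tv sv : Int) :
    ∀ (ks : List String) (c : Int) (acc : PySem.Dict String Int),
      ks.foldl (fun (st : Int × PySem.Dict String Int) k =>
          (st.1 + 1,
           let d1 := if st.1 = a then st.2.insert k tv else st.2
           if st.1 = b then d1.insert k sv else d1)) (c, acc)
      = (c + ks.length,
         if 0 ≤ a - c ∧ a - c < ks.length then
           if 0 ≤ b - c ∧ b - c < ks.length then
             if a ≤ b then (acc.insert (ks.getD (a - c).toNat "") tv).insert (ks.getD (b - c).toNat "") sv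
             else (acc.insert (ks.getD (b - c).toNat "") sv).insert (ks.getD (a - c).toNat "") tv
           else acc.insert (ks.getD (a - c).toNat "") tv
         else if 0 ≤ b - c ∧ b - c < ks.length then acc.insert (ks.getD (b - c).toNat "") sv
         else acc) := by
  intro ks
  induction ks with
  | nil =>
    intro c acc
    simp only [List.foldl_nil, List.length_nil, Nat.cast_zero, add_zero]
    split_ifs <;> first | rfl | omega
  | cons k ks ih =>
    intro c acc
    have hsh : ∀ x : Int, (k :: ks).getD (x - c).toNat "" =
        if x ≤ c then k else ks.getD (x - (c + 1)).toNat "" := by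
      intro x
      by_cases hx : x ≤ c
      · rw [if_pos hx]
        have e : (x - c).toNat = 0 := by omega
        rw [e]; rfl
      · rw [if_neg hx]
        have e : (x - c).toNat = (x - (c + 1)).toNat + 1 := by omega
        rw [e]; rfl
    simp only [List.foldl_cons, ih, List.length_cons, Prod.mk.injEq]
    refine ⟨by push_cast; ring, ?_⟩
    rw [hsh, hsh]
    split_ifs <;> first | rfl | omega

-- two inserts at distinct keys both already present commute, at the items level
theorem pvInsertComm (d : PySem.Dict String Int) (k k' : String) (v v' : Int)
    (hk : d.contains k = true) (hk' : d.contains k' = true) (hne : k ≠ k') :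
    (d.insert k v).insert k' v' = (d.insert k' v').insert k v := by
  apply PySem.Dict.ext
  have hk2 : (d.insert k v).contains k' = true := by
    rw [PySem.Dict.contains_insert]; simp [hk']
  have hk2' : (d.insert k' v').contains k = true := by
    rw [PySem.Dict.contains_insert]; simp [hk]
  rw [PySem.Dict.items_insert_of_contains _ _ hk2,
      PySem.Dict.items_insert_of_contains _ _ hk,
      PySem.Dict.items_insert_of_contains _ _ hk2',
      PySem.Dict.items_insert_of_contains _ _ hk',
      List.map_map, List.map_map]
  apply List.map_congr_left
  intro p _
  simp only [Function.comp_apply]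
  by_cases h1 : p.1 = k <;> by_cases h2 : p.1 = k' <;>
    simp [h1, h2, hne, Ne.symm hne]

theorem swap_dict_eq_alt (dict_a : List (String × Int)) (index_0 index_1 : Int) :
    swap_dict dict_a index_0 index_1 = swap_dict_alt dict_a index_0 index_1 := by
  unfold swap_dict swap_dict_alt
  by_cases h0 : index_0 < 0 ∨ ((PySem.Dict.mk dict_a).size : Int) ≤ index_0
  · simp only [if_pos h0]
  by_cases h1 : index_1 < 0 ∨ ((PySem.Dict.mk dict_a).size : Int) ≤ index_1
  · simp only [if_neg h0, if_pos h1]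
  simp only [if_neg h0, if_neg h1]
  rw [not_or] at h0 h1
  have hsz : (PySem.Dict.mk dict_a).size = dict_a.length := rfl
  have hkl : (PySem.Dict.mk dict_a).keys.length = dict_a.length := by
    simp [PySem.Dict.keys]
  rw [hsz] at h0 h1
  rw [pvFold1, pvFold2]
  have c0 : 0 ≤ index_0 - 0 ∧ index_0 - 0 < ((PySem.Dict.mk dict_a).keys.length : Int) := by
    rw [hkl]; omega
  have c1 : 0 ≤ index_1 - 0 ∧ index_1 - 0 < ((PySem.Dict.mk dict_a).keys.length : Int) := by
    rw [hkl]; omega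
  have hg0 : (PySem.List.pyGet? (PySem.Dict.mk dict_a).keys index_0).getD "" =
      (PySem.Dict.mk dict_a).keys.getD (index_0 - 0).toNat "" := by
    rw [PySem.List.pyGet?_eq_some_getElem _ (by omega) (by rw [hkl]; omega)]
    rw [List.getD_eq_getElem _ _ (by rw [hkl]; omega : (index_0 - 0).toNat < (PySem.Dict.mk dict_a).keys.length)]
    simp only [Option.getD_some]
    congr 1
    omega
  have hg1 : (PySem.List.pyGet? (PySem.Dict.mk dict_a).keys index_1).getD "" =
      (PySem.Dict.mk dict_a).keys.getD (index_1 - 0).toNat "" := by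
    rw [PySem.List.pyGet?_eq_some_getElem _ (by omega) (by rw [hkl]; omega)]
    rw [List.getD_eq_getElem _ _ (by rw [hkl]; omega : (index_1 - 0).toNat < (PySem.Dict.mk dict_a).keys.length)]
    simp only [Option.getD_some]
    congr 1
    omega
  simp only [if_pos c0, if_pos c1, Option.getD_some, hg0, hg1]
  set d := PySem.Dict.mk dict_a with hd
  set ka := d.keys.getD (index_0 - 0).toNat "" with hka
  set kb := d.keys.getD (index_1 - 0).toNat "" with hkb
  have hmem0 : ka ∈ d.keys := by
    rw [hka, List.getD_eq_getElem _ _ (by rw [hkl]; omega : (index_0 - 0).toNat < d.keys.length)]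
    exact List.getElem_mem _
  have hmem1 : kb ∈ d.keys := by
    rw [hkb, List.getD_eq_getElem _ _ (by rw [hkl]; omega : (index_1 - 0).toNat < d.keys.length)]
    exact List.getElem_mem _
  by_cases hab : index_0 ≤ index_1
  · simp [if_pos hab]
  · simp only [if_neg hab]
    by_cases hk : ka = kb
    · simp [hk, PySem.Dict.insert_insert_self]
    · rw [pvInsertComm d kb ka (d.getD ka 0) (d.getD kb 0)
        ((PySem.Dict.contains_iff_mem_keys d kb).mpr hmem1)
        ((PySem.Dict.contains_iff_mem_keys d ka).mpr hmem0)
        (Ne.symm hk)]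

-- ===== VERDICT (by name: the statement is the Claim_ definition above) =====
theorem swap_dict_spec : Claim_equal_swap_dict := by
  intro dict_a index_0 index_1 _
  unfold Spec_swap_dict
  exact swap_dict_eq_alt dict_a index_0 index_1
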